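-- pv_equiv track=rewrite | github.com/jasminextan/markdown_compiler | markdown_compiler.py | compile_links
-- ===== SOURCE A (Python) =====
-- def compile_links(line):
--     '''
--     Add <a> tags.
--
--     HINT:
--     The links and images are potentially more complicated because they have many types of delimeters: `[]()`.
--     These delimiters are not symmetric, however, so we can more easily find the start and stop locations using the strings find function.
--
--     >>> compile_links('Click on the [course webpage](https://github.com/mikeizbicki/cmc-csci040)!')
--     'Click on the <a href="https://github.com/mikeizbicki/cmc-csci040">course webpage</a>!'
--     >>> compile_links('[course webpage](https://github.com/mikeizbicki/cmc-csci040)')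
--     '<a href="https://github.com/mikeizbicki/cmc-csci040">course webpage</a>'
--     >>> compile_links('this is wrong: [course webpage]    (https://github.com/mikeizbicki/cmc-csci040)')
--     'this is wrong: [course webpage]    (https://github.com/mikeizbicki/cmc-csci040)'
--     >>> compile_links('this is wrong: [course webpage](https://github.com/mikeizbicki/cmc-csci040')
--     'this is wrong: [course webpage](https://github.com/mikeizbicki/cmc-csci040'
--     '''
--     moveon = False
--     sitename = ''
--     sitelink = ''
--     linetwo = ''
--     linethree = '<a href="'
--     linefour = '">'
--     linefive = '</a>'
--     linesix = ''
--     end = False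
--     startbracket = False
--     endbracket = False
--     startparenth = False
--     endparenth = False
--     x = 0
--     for c in line:
--         if c == ']':
--             x = 2
--         if c == '(' and x == 1:
--             moveon = True
--         else:
--             x += -1
--     for z in line:
--         if z == '[':
--             break
--         linetwo += z
--     for x in line:
--         if x == ')':
--             end = True
--         elif end == True:
--             linesix += x
--     for p in line:
--         if p == ')':
--             endparenth = True
--         elif p == '(':
--             startparenth = True
--         elif endparenth == False and startparenth == True:
--             sitelink += p
--     for b in line:
--         if b == ']':
--             endbracket = True
--         elif b == '[':
--             startbracket = True
--         elif endbracket == False and startbracket == True: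
--             sitename += b
--     if moveon == False:
--         return line
--     if endparenth == False:
--         return line
--     if endbracket == False:
--         return line
--     return linetwo + linethree + sitelink + linefour + sitename + linefive + linesix
-- ===== SOURCE B (Python) =====
-- def compile_links(line):
--     if '](' not in line or ')' not in line:
--         return line
--     ob = line.find('[')
--     cb = line.find(']')
--     op = line.find('(')
--     cp = line.find(')')
--     return line[:ob] + '<a href="' + line[op + 1:cp] + '">' + line[ob + 1:cb] + '</a>' + line[cp + 1:]
-- ===== Notes on version B (the rewrite author's own statement) =====
-- stated objective: simpler
-- what changed: B replaces A's five character-scanning flag loops by four str.find calls plus direct slicing, guarded by a single substring test.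
-- intended difference: On transformable lines that lack an opening bracket entirely, or contain a second opening bracket before the first closing bracket, a second opening parenthesis before the first closing parenthesis, or more than one closing parenthesis, A silently deletes those stray delimiter characters (and with no opening bracket uses the whole line as prefix), while B keeps the surrounding text verbatim, which is the intended output of a link compiler. — e.g. on compile_links("[a](b))"): A returns "<a href=\"b\">a</a>", B returns "<a href=\"b\">a</a>)"
import Mathlib
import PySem

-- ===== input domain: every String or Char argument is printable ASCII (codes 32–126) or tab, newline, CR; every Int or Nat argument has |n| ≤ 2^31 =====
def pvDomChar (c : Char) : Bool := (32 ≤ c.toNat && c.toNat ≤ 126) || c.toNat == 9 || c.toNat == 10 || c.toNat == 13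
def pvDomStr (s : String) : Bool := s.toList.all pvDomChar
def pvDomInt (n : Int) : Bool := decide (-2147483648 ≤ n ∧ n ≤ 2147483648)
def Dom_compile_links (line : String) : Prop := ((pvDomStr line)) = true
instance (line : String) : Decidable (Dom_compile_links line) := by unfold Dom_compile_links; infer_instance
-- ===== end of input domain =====

-- B replaces A's five character-scanning flag loops by four str.find calls plus direct
-- slicing: simpler. On lines with stray delimiter characters around the link, A silently
-- deletes those characters while B keeps the text verbatim (stated as D_ below).

-- ===== PORT A =====
-- loop 1: moveon detection ("](" adjacency via the x counter)
def pvMvStep (s : Bool × Int) (c : Char) : Bool × Int :=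
  let x := if c = ']' then (2 : Int) else s.2
  if c = '(' ∧ x = 1 then (true, x) else (s.1, x - 1)

-- loop 2: linetwo — copy chars until the first '[' (the Python loop breaks there)
def pvLinetwoGo : List Char → List Char
  | [] => []
  | z :: r => if z = '[' then [] else z :: pvLinetwoGo r

-- loop 3: linesix — after the first ')', copy every non-')' char
def pvSixStep (s : Bool × List Char) (x : Char) : Bool × List Char :=
  if x = ')' then (true, s.2)
  else if s.1 = true then (s.1, s.2 ++ [x])
  else s

-- loops 4 and 5 have the same body up to the delimiter pair (openc, closec);
-- state = (endFlag, startFlag, acc)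
def pvGrabStep (openc closec : Char) (s : Bool × Bool × List Char) (b : Char) : Bool × Bool × List Char :=
  if b = closec then (true, s.2.1, s.2.2)
  else if b = openc then (s.1, true, s.2.2)
  else if s.1 = false ∧ s.2.1 = true then (s.1, s.2.1, s.2.2 ++ [b])
  else s

def compile_links (line : String) : String :=
  let l := line.toList
  let moveon := (l.foldl pvMvStep (false, (0 : Int))).1
  let linetwo := pvLinetwoGo l
  let six := l.foldl pvSixStep (false, [])
  let linesix := six.2
  let sl := l.foldl (pvGrabStep '(' ')') (false, false, [])
  let endparenth := sl.1
  let sitelink := sl.2.2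
  let sb := l.foldl (pvGrabStep '[' ']') (false, false, [])
  let endbracket := sb.1
  let sitename := sb.2.2
  if moveon = false then line
  else if endparenth = false then line
  else if endbracket = false then line
  else String.ofList (linetwo ++ "<a href=\"".toList ++ sitelink ++ "\">".toList ++ sitename ++ "</a>".toList ++ linesix)

-- ===== PORT B =====
def compile_links_alt (line : String) : String :=
  if !(PySem.Str.isIn "](" line) || !(PySem.Str.isIn ")" line) then line
  else
    let ob := PySem.Str.find line "["
    let cb := PySem.Str.find line "]"
    let op := PySem.Str.find line "("
    let cp := PySem.Str.find line ")"
    PySem.Str.slice line none (some ob) ++ "<a href=\"" ++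
      PySem.Str.slice line (some (op + 1)) (some cp) ++ "\">" ++
      PySem.Str.slice line (some (ob + 1)) (some cb) ++ "</a>" ++
      PySem.Str.slice line (some (cp + 1)) none

-- ===== PRECONDITION & SPEC =====
-- On transformable lines (a closing bracket immediately followed by an opening
-- parenthesis, plus a closing parenthesis) that lack an opening bracket entirely, or that
-- carry a second opening bracket before the first closing bracket, a second opening
-- parenthesis before the first closing parenthesis, or more than one closing parenthesis,
-- A silently deletes those stray delimiter characters (and with no opening bracket it uses
-- the whole line as prefix); B keeps the surrounding text verbatim, the intended output of
-- a link compiler.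
def D_compile_links (line : String) : Prop :=
  PySem.Str.isIn "](" line = true ∧ ')' ∈ line.toList ∧
    ('[' ∉ line.toList ∨
     2 ≤ (line.toList.takeWhile (· != ']')).count '[' ∨
     2 ≤ (line.toList.takeWhile (· != ')')).count '(' ∨
     2 ≤ line.toList.count ')')
instance (line : String) : Decidable (D_compile_links line) := by unfold D_compile_links; infer_instance

def Spec_compile_links (line : String) (out : String) : Prop := ¬ D_compile_links line → out = compile_links_alt line
instance (line : String) (out : String) : Decidable (Spec_compile_links line out) := by unfold Spec_compile_links; infer_instance

def pvDiffWitness_compile_links : String := "[a](b))"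
def pvDiffWitnessOut_compile_links : String × String := ("<a href=\"b\">a</a>", "<a href=\"b\">a</a>)")

-- ===== CLAIM (what is proved, stated in full; the proofs are below) =====
def Claim_unchanged_compile_links : Prop := ∀ (line : String), Dom_compile_links line → Spec_compile_links line (compile_links line)
def Claim_exact_compile_links : Prop := ∀ (line : String), Dom_compile_links line → D_compile_links line → compile_links line ≠ compile_links_alt line
def Claim_changed_compile_links : Prop := Dom_compile_links (pvDiffWitness_compile_links) ∧ D_compile_links (pvDiffWitness_compile_links) ∧ compile_links (pvDiffWitness_compile_links) = pvDiffWitnessOut_compile_links.1 ∧ compile_links_alt (pvDiffWitness_compile_links) = pvDiffWitnessOut_compile_links.2 ∧ pvDiffWitnessOut_compile_links.1 ≠ pvDiffWitnessOut_compile_links.2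

-- ===== LEMMAS AND PROOFS =====

-- helper predicate: "is not the character c", as the Bool test the loops use
def pvNe (c : Char) : Char → Bool := fun x => !(x == c)

-- spec of loops 4/5 from the initial state: skip until the first delimiter; a close
-- char first gives [], an open char first gives the filtered stretch up to the close
def pvBetween (o c : Char) : List Char → List Char
  | [] => []
  | x :: r => if x = c then [] else if x = o then (r.takeWhile (pvNe c)).filter (pvNe o) else pvBetween o c r

theorem pv_mv_true (l : List Char) (x : Int) : (l.foldl pvMvStep (true, x)).1 = true := by
  induction l generalizing x with
  | nil => rfl
  | cons a t ih => simp only [List.foldl_cons, pvMvStep]; split_ifs <;> exact ih _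

theorem pv_mv (l : List Char) :
    (∀ (m : Bool) (x : Int), x ≤ 0 → (l.foldl pvMvStep (m, x)).1 = (m || decide ([']','('] <:+: l))) ∧
    (∀ (m : Bool), (l.foldl pvMvStep (m, 1)).1 = (m || decide ([']','('] <:+: (']' :: l)))) := by
  induction l with
  | nil =>
    refine ⟨fun m x _ => ?_, fun m => ?_⟩
    · simp [List.foldl_nil]
    · have : ¬ ([']','('] <:+: [']']) := by decide
      simp [List.foldl_nil, this]
  | cons a t ih =>
    obtain ⟨ihn, iho⟩ := ih
    refine ⟨fun m x hx => ?_, fun m => ?_⟩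
    · simp only [List.foldl_cons, pvMvStep]
      by_cases h1 : a = ']'
      · have hcond : ¬ (a = '(' ∧ (if a = ']' then (2:Int) else x) = 1) := by simp [h1]
        rw [if_neg hcond]
        simp only [h1]
        have := iho m
        norm_num at this ⊢
        rw [this]
      · have hx1 : (if a = ']' then (2:Int) else x) = x := if_neg h1
        have hcond : ¬ (a = '(' ∧ (if a = ']' then (2:Int) else x) = 1) := by
          rw [hx1]; rintro ⟨_, h⟩; omega
        rw [if_neg hcond, hx1]
        have heq : ([']','('] <:+: (a :: t)) ↔ ([']','('] <:+: t) := by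
          rw [List.infix_cons_iff]
          constructor
          · rintro (hp | h)
            · rw [List.cons_prefix_cons] at hp
              exact absurd hp.1.symm h1
            · exact h
          · exact Or.inr
        rw [ihn m (x - 1) (by omega)]
        simp [heq]
    · simp only [List.foldl_cons, pvMvStep]
      by_cases h1 : a = ']'
      · have hcond : ¬ (a = '(' ∧ (if a = ']' then (2:Int) else (1:Int)) = 1) := by simp [h1]
        rw [if_neg hcond]
        simp only [h1]
        have := iho m
        norm_num at this ⊢
        rw [this]
        have heq : ([']','('] <:+: (']' :: ']' :: t)) ↔ ([']','('] <:+: (']' :: t)) := by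
          rw [List.infix_cons_iff]
          constructor
          · rintro (hp | h)
            · rw [List.cons_prefix_cons, List.cons_prefix_cons] at hp
              exact absurd hp.2.1.symm (by decide)
            · exact h
          · exact Or.inr
        simp [heq]
      · have hx1 : (if a = ']' then (2:Int) else (1:Int)) = 1 := if_neg h1
        by_cases h2 : a = '('
        · rw [if_pos ⟨h2, hx1⟩, hx1]
          have := pv_mv_true t 1
          norm_num at this ⊢
          rw [this]
          have : [']','('] <:+: (']' :: a :: t) := by
            exact ⟨[], t, by simp [h2]⟩
          simp [this]
        · have hcond : ¬ (a = '(' ∧ (if a = ']' then (2:Int) else (1:Int)) = 1) := by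
            rintro ⟨h, _⟩; exact h2 h
          rw [if_neg hcond, hx1]
          norm_num
          rw [ihn m 0 (by omega)]
          have heq : ([']','('] <:+: (']' :: a :: t)) ↔ ([']','('] <:+: t) := by
            rw [List.infix_cons_iff, List.infix_cons_iff]
            constructor
            · rintro (hp | hp | h)
              · rw [List.cons_prefix_cons, List.cons_prefix_cons] at hp
                exact absurd hp.2.1.symm h2
              · rw [List.cons_prefix_cons] at hp
                exact absurd hp.1.symm h1
              · exact h
            · exact fun h => Or.inr (Or.inr h)
          simp [heq]

theorem pv_linetwo (l : List Char) : pvLinetwoGo l = l.takeWhile (pvNe '[') := by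
  induction l with
  | nil => rfl
  | cons a t ih =>
    simp only [pvLinetwoGo, List.takeWhile_cons, pvNe]
    by_cases h : a = '[' <;> simp [h, ih]

theorem pv_six_true (l : List Char) (acc : List Char) :
    (l.foldl pvSixStep (true, acc)).2 = acc ++ l.filter (pvNe ')') := by
  induction l generalizing acc with
  | nil => simp
  | cons a t ih =>
    simp only [List.foldl_cons, pvSixStep, List.filter_cons, pvNe]
    by_cases h : a = ')' <;> simp [h, ih]

theorem pv_six (l : List Char) (acc : List Char) :
    (l.foldl pvSixStep (false, acc)).2 = acc ++ ((l.dropWhile (pvNe ')')).tail).filter (pvNe ')') := by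
  induction l generalizing acc with
  | nil => simp
  | cons a t ih =>
    simp only [List.foldl_cons, pvSixStep, List.dropWhile_cons, pvNe]
    by_cases h : a = ')'
    · simp [h, pv_six_true]
    · simp [h, ih]

theorem pv_grab_fst_true (o c : Char) (l : List Char) (sp : Bool) (acc : List Char) :
    (l.foldl (pvGrabStep o c) (true, sp, acc)).1 = true := by
  induction l generalizing sp acc with
  | nil => rfl
  | cons a t ih => simp only [List.foldl_cons, pvGrabStep]; split_ifs <;> exact ih _ _

theorem pv_grab_fst (o c : Char) (l : List Char) (ep sp : Bool) (acc : List Char) :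
    (l.foldl (pvGrabStep o c) (ep, sp, acc)).1 = (ep || decide (c ∈ l)) := by
  induction l generalizing ep sp acc with
  | nil => simp
  | cons a t ih =>
    simp only [List.foldl_cons, pvGrabStep]
    by_cases h1 : a = c
    · simp [h1, pv_grab_fst_true]
    · by_cases h2 : a = o
      · have hoc : ¬ o = c := fun hh => h1 (h2.trans hh)
        have hco : ¬ c = o := fun hh => hoc hh.symm
        simp [h2, hoc, hco, ih]
      · split_ifs <;> simp [ih, Ne.symm h1]

theorem pv_grab_done (o c : Char) (l : List Char) (sp : Bool) (acc : List Char) :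
    (l.foldl (pvGrabStep o c) (true, sp, acc)).2.2 = acc := by
  induction l generalizing sp acc with
  | nil => rfl
  | cons a t ih =>
    simp only [List.foldl_cons, pvGrabStep]
    split_ifs with h1 h2 h3
    · exact ih _ _
    · exact ih _ _
    · exact absurd h3.1 (by simp)
    · exact ih _ _

theorem pv_grab_open (o c : Char) (hoc : o ≠ c) (l : List Char) (acc : List Char) :
    (l.foldl (pvGrabStep o c) (false, true, acc)).2.2 = acc ++ (l.takeWhile (pvNe c)).filter (pvNe o) := by
  induction l generalizing acc with
  | nil => simp
  | cons a t ih =>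
    simp only [List.foldl_cons, pvGrabStep, List.takeWhile_cons, pvNe]
    by_cases h1 : a = c
    · simp [h1, pv_grab_done]
    · by_cases h2 : a = o
      · simp [h2, ih, hoc, pvNe]
      · simp [h1, h2, ih, pvNe, List.append_assoc]

theorem pv_grab_start (o c : Char) (hoc : o ≠ c) (l : List Char) (acc : List Char) :
    (l.foldl (pvGrabStep o c) (false, false, acc)).2.2 = acc ++ pvBetween o c l := by
  induction l generalizing acc with
  | nil => simp [pvBetween]
  | cons a t ih =>
    simp only [List.foldl_cons, pvGrabStep, pvBetween]
    by_cases h1 : a = c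
    · simp [h1, pv_grab_done]
    · by_cases h2 : a = o
      · have hoc' : ¬ o = c := fun hh => h1 (h2.trans hh)
        simp [h2, hoc', pv_grab_open o c hoc]
      · simp [h1, h2, ih]

theorem pv_between_cfirst (o c : Char) (l : List Char) (h : o ∉ l.takeWhile (pvNe c)) :
    pvBetween o c l = [] := by
  induction l with
  | nil => rfl
  | cons a t ih =>
    simp only [pvBetween]
    split_ifs with h1 h2
    · rfl
    · exfalso; apply h
      have hne : pvNe c a = true := by simp [pvNe, h1]
      have h2' : pvNe c o = true := h2 ▸ hne
      simp [h2, h2']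
    · apply ih; intro hm; apply h; simp only [List.takeWhile_cons, pvNe] at *
      by_cases hac : a = c
      · exact absurd hac h1
      · simp [hac] at *; exact Or.inr hm

theorem pv_between_ofirst (o c : Char) (hoc : o ≠ c) (l : List Char) (ho : o ∈ l)
    (hc : c ∉ l.takeWhile (pvNe o)) :
    pvBetween o c l = (((l.dropWhile (pvNe o)).tail).takeWhile (pvNe c)).filter (pvNe o) := by
  induction l with
  | nil => simp at ho
  | cons a t ih =>
    simp only [pvBetween, List.dropWhile_cons, pvNe]
    by_cases h2 : a = o
    · simp [h2, hoc]
    · by_cases h1 : a = c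
      · exfalso; apply hc
        have hne : pvNe o a = true := by simp [pvNe, h2]
        have h1' : pvNe o c = true := h1 ▸ hne
        simp [h1, h1']
      · have ho' : o ∈ t := by cases ho with
          | head => exact absurd rfl h2
          | tail _ h => exact h
        have hc' : c ∉ t.takeWhile (pvNe o) := by
          intro hm; apply hc; simp [pvNe, h2, hm]
        simp [h1, h2, ih ho' hc']

theorem pv_drop_takeWhile (p : Char → Bool) (l : List Char) :
    l.drop (l.takeWhile p).length = l.dropWhile p := by
  calc l.drop (l.takeWhile p).length
      = (l.takeWhile p ++ l.dropWhile p).drop (l.takeWhile p).length := by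
        rw [List.takeWhile_append_dropWhile]
    _ = l.dropWhile p := List.drop_left

theorem pv_take_takeWhile (p : Char → Bool) (l : List Char) :
    l.take (l.takeWhile p).length = l.takeWhile p :=
  (List.prefix_iff_eq_take.mp (List.takeWhile_prefix p)).symm

theorem pv_dropWhile_cons_of_mem (c : Char) (l : List Char) (h : c ∈ l) :
    l.dropWhile (pvNe c) = c :: (l.dropWhile (pvNe c)).tail := by
  induction l with
  | nil => simp at h
  | cons a t ih =>
    by_cases hac : a = c
    · simp [pvNe, hac]
    · have h' : c ∈ t := by
        cases h with
        | head => exact absurd rfl hac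
        | tail _ hh => exact hh
      simpa [List.dropWhile_cons, pvNe, hac] using ih h'

theorem pv_decomp (c : Char) (l : List Char) (h : c ∈ l) :
    l = l.takeWhile (pvNe c) ++ c :: (l.dropWhile (pvNe c)).tail := by
  conv_lhs => rw [← List.takeWhile_append_dropWhile (p := pvNe c) (l := l)]
  rw [← pv_dropWhile_cons_of_mem c l h]

theorem pv_find_not_mem (c : Char) (l : List Char) (h : c ∉ l) :
    PySem.Chars.find l [c] = -1 :=
  (PySem.Chars.find_eq_neg_one_iff _ _).mpr (by rw [List.singleton_infix_iff]; exact h)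

theorem pv_find_mem (c : Char) (l : List Char) (h : c ∈ l) :
    PySem.Chars.find l [c] = ((l.takeWhile (pvNe c)).length : Int) := by
  have hinf : [c] <:+: l := (List.singleton_infix_iff c l).mpr h
  have hne : PySem.Chars.find l [c] ≠ -1 := (PySem.Chars.find_ne_neg_one_iff _ _).mpr hinf
  have hm1 : -1 ≤ PySem.Chars.find l [c] := PySem.Chars.neg_one_le_find l [c]
  have hge : 0 ≤ PySem.Chars.find l [c] := by omega
  obtain ⟨hpre, hmin⟩ := PySem.Chars.find_spec hge
  have hpt : [c] <+: l.drop (l.takeWhile (pvNe c)).length := by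
    rw [pv_drop_takeWhile, pv_dropWhile_cons_of_mem c l h]
    exact ⟨_, rfl⟩
  have hlt : ∀ i < (l.takeWhile (pvNe c)).length, ¬ ([c] <+: l.drop i) := by
    intro i hi hp
    have hhead : (l.drop i).head? = some c := by
      obtain ⟨r, hr⟩ := hp
      rw [← hr]; rfl
    rw [List.head?_drop] at hhead
    have hig : i < l.length := lt_of_lt_of_le hi (List.takeWhile_prefix (pvNe c)).length_le
    rw [List.getElem?_eq_getElem hig] at hhead
    have hci : l[i] = c := by injection hhead
    have hg : (l.takeWhile (pvNe c))[i] = l[i] := (List.takeWhile_prefix (pvNe c)).getElem hi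
    have hmem : (l.takeWhile (pvNe c))[i] ∈ l.takeWhile (pvNe c) := List.getElem_mem hi
    have hpv := List.mem_takeWhile_imp hmem
    rw [hg, hci] at hpv
    simp [pvNe] at hpv
  have h1 : ¬ ((l.takeWhile (pvNe c)).length < (PySem.Chars.find l [c]).toNat) :=
    fun hh => (hmin _ hh) hpt
  have h2 : ¬ ((PySem.Chars.find l [c]).toNat < (l.takeWhile (pvNe c)).length) :=
    fun hh => (hlt _ hh) hpre
  omega

theorem pv_tw_lt (o c : Char) (hoc : o ≠ c) (l : List Char) (ho : o ∈ l) :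
    ((l.takeWhile (pvNe o)).length < (l.takeWhile (pvNe c)).length ↔ c ∉ l.takeWhile (pvNe o)) := by
  have hco : ¬ c = o := fun hh => hoc hh.symm
  induction l with
  | nil => simp at ho
  | cons a t ih =>
    by_cases h2 : a = o
    · have h1 : ¬ a = c := fun hh => hoc (h2.symm.trans hh)
      simp [pvNe, h2, hoc]
    · have ho' : o ∈ t := by cases ho with
        | head => exact absurd rfl h2
        | tail _ hh => exact hh
      by_cases h1 : a = c
      · simp [pvNe, h1, hco]
      · simp [pvNe, h2, h1, ih ho', Ne.symm h1]

theorem pv_tw_ne (o c : Char) (hoc : o ≠ c) (l : List Char) (ho : o ∈ l) (hc : c ∈ l) :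
    (l.takeWhile (pvNe o)).length ≠ (l.takeWhile (pvNe c)).length := by
  induction l with
  | nil => simp at ho
  | cons a t ih =>
    by_cases h2 : a = o
    · have h1 : ¬ a = c := fun hh => hoc (h2.symm.trans hh)
      have e1 : pvNe o a = false := by simp [pvNe, h2]
      have e2 : pvNe c a = true := by simp [pvNe, h1]
      simp [e1, e2]
    · by_cases h1 : a = c
      · have e1 : pvNe o a = true := by simp [pvNe, h2]
        have e2 : pvNe c a = false := by simp [pvNe, h1]
        simp [e1, e2]
      · have e1 : pvNe o a = true := by simp [pvNe, h2]
        have e2 : pvNe c a = true := by simp [pvNe, h1]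
        have ho' : o ∈ t := by cases ho with
          | head => exact absurd rfl h2
          | tail _ hh => exact hh
        have hc' : c ∈ t := by cases hc with
          | head => exact absurd rfl h1
          | tail _ hh => exact hh
        simp only [List.takeWhile_cons, e1, e2, if_true]
        simpa using ih ho' hc'

theorem pv_drop_succ (c : Char) (l : List Char) (hc : c ∈ l) :
    l.drop ((l.takeWhile (pvNe c)).length + 1) = (l.dropWhile (pvNe c)).tail := by
  have hsplit : l = (l.takeWhile (pvNe c) ++ [c]) ++ (l.dropWhile (pvNe c)).tail := by
    rw [List.append_assoc]
    exact pv_decomp c l hc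
  have hd := List.drop_left' (l₁ := l.takeWhile (pvNe c) ++ [c])
    (l₂ := (l.dropWhile (pvNe c)).tail) (i := (l.takeWhile (pvNe c)).length + 1) (by simp)
  rw [← hsplit] at hd
  exact hd

theorem pv_tw_split (o c : Char) (hoc : o ≠ c) (l : List Char) (ho : o ∈ l)
    (hfirst : c ∉ l.takeWhile (pvNe o)) :
    l.takeWhile (pvNe c)
      = (l.takeWhile (pvNe o) ++ [o]) ++ ((l.dropWhile (pvNe o)).tail).takeWhile (pvNe c) := by
  have hsplit : l = (l.takeWhile (pvNe o) ++ [o]) ++ (l.dropWhile (pvNe o)).tail := by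
    rw [List.append_assoc]
    exact pv_decomp o l ho
  have ht := List.takeWhile_append_of_pos (p := pvNe c)
    (l₁ := l.takeWhile (pvNe o) ++ [o]) (l₂ := (l.dropWhile (pvNe o)).tail) ?_
  · rw [← hsplit] at ht
    exact ht
  intro x hx
  rcases List.mem_append.mp hx with hxp | hxo
  · have hxc : ¬ x = c := fun hh => hfirst (hh ▸ hxp)
    simp [pvNe, hxc]
  · have hxo' : x = o := by simpa using hxo
    rw [hxo']
    simp [pvNe, hoc]

theorem pv_tw_len_split (o c : Char) (hoc : o ≠ c) (l : List Char) (ho : o ∈ l)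
    (hfirst : c ∉ l.takeWhile (pvNe o)) :
    (l.takeWhile (pvNe c)).length
      = (l.takeWhile (pvNe o)).length + 1 + (((l.dropWhile (pvNe o)).tail).takeWhile (pvNe c)).length := by
  rw [pv_tw_split o c hoc l ho hfirst]
  simp
  omega

theorem pv_slice_mid (o c : Char) (hoc : o ≠ c) (l : List Char) (ho : o ∈ l)
    (hfirst : c ∉ l.takeWhile (pvNe o)) :
    PySem.List.slice l (some (((l.takeWhile (pvNe o)).length : Int) + 1)) (some ((l.takeWhile (pvNe c)).length : Int))
      = ((l.dropWhile (pvNe o)).tail).takeWhile (pvNe c) := by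
  have hcast : ((l.takeWhile (pvNe o)).length : Int) + 1 = (((l.takeWhile (pvNe o)).length + 1 : Nat) : Int) := by
    push_cast; ring
  rw [hcast, PySem.List.slice_natCast, pv_drop_succ o l ho]
  rw [pv_tw_len_split o c hoc l ho hfirst]
  have : (l.takeWhile (pvNe o)).length + 1 + (((l.dropWhile (pvNe o)).tail).takeWhile (pvNe c)).length
      - ((l.takeWhile (pvNe o)).length + 1) = (((l.dropWhile (pvNe o)).tail).takeWhile (pvNe c)).length := by
    omega
  rw [this, pv_take_takeWhile]

theorem pv_filter_id (c : Char) (l : List Char) (h : c ∉ l) : l.filter (pvNe c) = l := by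
  rw [List.filter_eq_self]
  intro x hx
  simp [pvNe]
  exact fun hh => h (hh ▸ hx)

theorem pv_slice_empty (l : List Char) (a b : Nat) (h : b ≤ a) :
    PySem.List.slice l (some ((a : Nat) : Int)) (some ((b : Nat) : Int)) = [] := by
  rw [PySem.List.slice_natCast, Nat.sub_eq_zero_of_le h, List.take_zero]

-- A's loop-4/5 result equals B's slice when the between-region has no stray open char
theorem pv_grab_eq (o c : Char) (hoc : o ≠ c) (l : List Char) (ho : o ∈ l) (hc : c ∈ l)
    (hstray : ¬ (o ∈ l.takeWhile (pvNe c) ∧ o ∈ ((l.dropWhile (pvNe o)).tail).takeWhile (pvNe c))) :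
    PySem.List.slice l (some (((l.takeWhile (pvNe o)).length : Int) + 1))
        (some ((l.takeWhile (pvNe c)).length : Int))
      = (l.foldl (pvGrabStep o c) (false, false, [])).2.2 := by
  rw [pv_grab_start o c hoc _ [], List.nil_append]
  have hne := pv_tw_ne o c hoc l ho hc
  by_cases hcase : (l.takeWhile (pvNe o)).length < (l.takeWhile (pvNe c)).length
  · have hNP : c ∉ l.takeWhile (pvNe o) := (pv_tw_lt o c hoc l ho).mp hcase
    have hmem : o ∈ l.takeWhile (pvNe c) := by
      by_contra hx
      exact absurd ((pv_tw_lt c o (Ne.symm hoc) l hc).mpr hx) (by omega)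
    have hstray' : o ∉ ((l.dropWhile (pvNe o)).tail).takeWhile (pvNe c) := fun hh => hstray ⟨hmem, hh⟩
    rw [pv_slice_mid o c hoc l ho hNP, pv_between_ofirst o c hoc l ho hNP,
      pv_filter_id _ _ hstray']
  · have hlt : (l.takeWhile (pvNe c)).length < (l.takeWhile (pvNe o)).length := by omega
    have hout : o ∉ l.takeWhile (pvNe c) := (pv_tw_lt c o (Ne.symm hoc) l hc).mp hlt
    rw [pv_between_cfirst o c l hout]
    have hcast : ((l.takeWhile (pvNe o)).length : Int) + 1
        = (((l.takeWhile (pvNe o)).length + 1 : Nat) : Int) := by push_cast; ring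
    rw [hcast, pv_slice_empty l _ _ (by omega)]

theorem pv_count_tw_zero (c : Char) (l : List Char) : (l.takeWhile (pvNe c)).count c = 0 :=
  List.count_eq_zero.mpr (fun h => by have := List.mem_takeWhile_imp h; simp [pvNe] at this)

theorem pv_tail_mem_count (c : Char) (l : List Char) (hc : c ∈ l)
    (h : c ∈ (l.dropWhile (pvNe c)).tail) : 2 ≤ l.count c := by
  have hd := pv_decomp c l hc
  have h1 : 0 < ((l.dropWhile (pvNe c)).tail).count c := List.count_pos_iff.mpr h
  have h2 : l.count c = (l.takeWhile (pvNe c)).count c + (1 + ((l.dropWhile (pvNe c)).tail).count c) := by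
    conv_lhs => rw [hd]
    simp [List.count_append]
    omega
  rw [pv_count_tw_zero] at h2
  omega

theorem pv_stray_count (o c : Char) (hoc : o ≠ c) (l : List Char) (ho : o ∈ l) (hc : c ∈ l)
    (h1 : o ∈ l.takeWhile (pvNe c)) (h2 : o ∈ ((l.dropWhile (pvNe o)).tail).takeWhile (pvNe c)) :
    2 ≤ (l.takeWhile (pvNe c)).count o := by
  have hfirst : c ∉ l.takeWhile (pvNe o) := by
    have hne := pv_tw_ne o c hoc l ho hc
    have hx : ¬ ((l.takeWhile (pvNe c)).length < (l.takeWhile (pvNe o)).length) :=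
      fun hx => ((pv_tw_lt c o (Ne.symm hoc) l hc).mp hx) h1
    exact (pv_tw_lt o c hoc l ho).mp (by omega)
  have hp : 0 < (((l.dropWhile (pvNe o)).tail).takeWhile (pvNe c)).count o := List.count_pos_iff.mpr h2
  have hz : (l.takeWhile (pvNe o)).count o = 0 := pv_count_tw_zero o l
  rw [pv_tw_split o c hoc l ho hfirst]
  simp [List.count_append, hz]
  omega

set_option maxHeartbeats 1000000 in
theorem pv_main (line : String) (hD : ¬ D_compile_links line) :
    compile_links line = compile_links_alt line := by
  have t2 : ("](" : String).toList = [']', '('] := rfl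
  have t1 : (")" : String).toList = [')'] := rfl
  have tLB : ("[" : String).toList = ['['] := rfl
  have tRB : ("]" : String).toList = [']'] := rfl
  have tOP : ("(" : String).toList = ['('] := rfl
  by_cases hA : [']','('] <:+: line.toList
  · by_cases hB : ')' ∈ line.toList
    · -- both guards pass: ¬D gives no stray delimiters
      have hIn2 : PySem.Str.isIn "](" line = true :=
        (PySem.Str.isIn_iff_infix "](" line).mpr (t2 ▸ hA)
      unfold D_compile_links at hD
      simp only [not_and, not_or] at hD
      obtain ⟨hLB', hN', hL', hS'⟩ := hD hIn2 hB
      have hLB : '[' ∈ line.toList := not_not.mp hLB'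
      have hRB : ']' ∈ line.toList := hA.sublist.subset (by simp)
      have hOP : '(' ∈ line.toList := hA.sublist.subset (by simp)
      have hstrN : ¬ ('[' ∈ line.toList.takeWhile (pvNe ']') ∧
          '[' ∈ ((line.toList.dropWhile (pvNe '[')).tail).takeWhile (pvNe ']')) :=
        fun hh => hN' (pv_stray_count '[' ']' (by decide) line.toList hLB hRB hh.1 hh.2)
      have hstrL : ¬ ('(' ∈ line.toList.takeWhile (pvNe ')') ∧
          '(' ∈ ((line.toList.dropWhile (pvNe '(')).tail).takeWhile (pvNe ')')) :=
        fun hh => hL' (pv_stray_count '(' ')' (by decide) line.toList hOP hB hh.1 hh.2)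
      have hstrS : ')' ∉ (line.toList.dropWhile (pvNe ')')).tail :=
        fun hh => hS' (pv_tail_mem_count ')' line.toList hB hh)
      have hIn1 : PySem.Str.isIn ")" line = true :=
        (PySem.Str.isIn_iff_infix ")" line).mpr (t1 ▸ (List.singleton_infix_iff ')' line.toList).mpr hB)
      have hmv : (line.toList.foldl pvMvStep (false, 0)).1 = true := by
        rw [(pv_mv line.toList).1 false 0 (by omega)]
        simp [hA]
      have hep : (line.toList.foldl (pvGrabStep '(' ')') (false, false, [])).1 = true := by
        rw [pv_grab_fst]
        simp [hB]
      have heb : (line.toList.foldl (pvGrabStep '[' ']') (false, false, [])).1 = true := by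
        rw [pv_grab_fst]
        simp [hRB]
      have hob : PySem.Str.find line "[" = ((line.toList.takeWhile (pvNe '[')).length : Int) := by
        rw [PySem.Str.find_eq, tLB, pv_find_mem _ _ hLB]
      have hcb : PySem.Str.find line "]" = ((line.toList.takeWhile (pvNe ']')).length : Int) := by
        rw [PySem.Str.find_eq, tRB, pv_find_mem _ _ hRB]
      have hop : PySem.Str.find line "(" = ((line.toList.takeWhile (pvNe '(')).length : Int) := by
        rw [PySem.Str.find_eq, tOP, pv_find_mem _ _ hOP]
      have hcp : PySem.Str.find line ")" = ((line.toList.takeWhile (pvNe ')')).length : Int) := by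
        rw [PySem.Str.find_eq, t1, pv_find_mem _ _ hB]
      simp only [compile_links, compile_links_alt, hIn1, hIn2, hmv, hep, heb]
      simp only [Bool.not_true, Bool.or_self, Bool.false_eq_true, Bool.true_eq_false, if_false]
      refine String.toList_inj.mp ?_
      simp only [String.toList_append, String.toList_ofList,
        PySem.Str.toList_slice, PySem.Chars.slice_eq_listSlice]
      rw [hob, hcb, hop, hcp]
      -- linetwo piece
      rw [PySem.List.slice_to_natCast, pv_take_takeWhile, pv_linetwo]
      -- linesix piece
      have hc1 : ((line.toList.takeWhile (pvNe ')')).length : Int) + 1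
          = (((line.toList.takeWhile (pvNe ')')).length + 1 : Nat) : Int) := by push_cast; ring
      rw [hc1, PySem.List.slice_from_natCast, pv_drop_succ ')' line.toList hB,
        pv_six _ [], List.nil_append, pv_filter_id _ _ hstrS]
      -- sitelink and sitename pieces
      rw [pv_grab_eq '(' ')' (by decide) line.toList hOP hB hstrL,
        pv_grab_eq '[' ']' (by decide) line.toList hLB hRB hstrN]
    · -- B: isIn ")" false → return line; A: endparenth false → line
      have hIn1 : PySem.Str.isIn ")" line = false := by
        cases hb : PySem.Str.isIn ")" line
        · rfl
        · exfalso
          have := (PySem.Str.isIn_iff_infix ")" line).mp hb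
          rw [t1, List.singleton_infix_iff] at this
          exact hB this
      have hIn2 : PySem.Str.isIn "](" line = true :=
        (PySem.Str.isIn_iff_infix "](" line).mpr (t2 ▸ hA)
      simp only [compile_links, compile_links_alt, hIn1, hIn2]
      have hmv : (line.toList.foldl pvMvStep (false, 0)).1 = true := by
        rw [(pv_mv line.toList).1 false 0 (by omega)]
        simp [hA]
      have hep : (line.toList.foldl (pvGrabStep '(' ')') (false, false, [])).1 = false := by
        rw [pv_grab_fst]
        simp [hB]
      rw [hmv, hep]
      simp
  · -- B: isIn "](" false → line; A: moveon false → line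
    have hIn2 : PySem.Str.isIn "](" line = false := by
      cases hb : PySem.Str.isIn "](" line
      · rfl
      · exfalso
        have := (PySem.Str.isIn_iff_infix "](" line).mp hb
        rw [t2] at this
        exact hA this
    simp only [compile_links, compile_links_alt, hIn2]
    have hmv : (line.toList.foldl pvMvStep (false, 0)).1 = false := by
      rw [(pv_mv line.toList).1 false 0 (by omega)]
      simp [hA]
    rw [hmv]
    simp

theorem pv_tw_all (c : Char) (l : List Char) (h : c ∉ l) : l.takeWhile (pvNe c) = l := by
  rw [List.takeWhile_eq_self_iff]
  intro x hx
  simp [pvNe]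
  exact fun hh => h (hh ▸ hx)

theorem pv_count_ge_two_mem_tail (c : Char) (l : List Char) (hc : c ∈ l) (h : 2 ≤ l.count c) :
    c ∈ (l.dropWhile (pvNe c)).tail := by
  have hd := pv_decomp c l hc
  have h2 : l.count c = (l.takeWhile (pvNe c)).count c + (1 + ((l.dropWhile (pvNe c)).tail).count c) := by
    conv_lhs => rw [hd]
    simp [List.count_append]
    omega
  rw [pv_count_tw_zero] at h2
  exact List.count_pos_iff.mp (by omega)

theorem pv_count_two_stray (o c : Char) (hoc : o ≠ c) (l : List Char) (ho : o ∈ l) (hc : c ∈ l)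
    (h : 2 ≤ (l.takeWhile (pvNe c)).count o) :
    c ∉ l.takeWhile (pvNe o) ∧ o ∈ ((l.dropWhile (pvNe o)).tail).takeWhile (pvNe c) := by
  have hmem : o ∈ l.takeWhile (pvNe c) := List.count_pos_iff.mp (by omega)
  have hfirst : c ∉ l.takeWhile (pvNe o) := by
    have hne := pv_tw_ne o c hoc l ho hc
    have hx : ¬ ((l.takeWhile (pvNe c)).length < (l.takeWhile (pvNe o)).length) :=
      fun hx => ((pv_tw_lt c o (Ne.symm hoc) l hc).mp hx) hmem
    exact (pv_tw_lt o c hoc l ho).mp (by omega)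
  refine ⟨hfirst, ?_⟩
  have hz : (l.takeWhile (pvNe o)).count o = 0 := pv_count_tw_zero o l
  rw [pv_tw_split o c hoc l ho hfirst] at h
  have hc2 : ((l.takeWhile (pvNe o) ++ [o]) ++ ((l.dropWhile (pvNe o)).tail).takeWhile (pvNe c)).count o
      = 1 + (((l.dropWhile (pvNe o)).tail).takeWhile (pvNe c)).count o := by
    simp [List.count_append, hz]
    omega
  rw [hc2] at h
  exact List.count_pos_iff.mp (by omega)

theorem pv_piece_le (o c : Char) (hoc : o ≠ c) (l : List Char) (ho : o ∈ l) (hc : c ∈ l) :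
    ((l.foldl (pvGrabStep o c) (false, false, [])).2.2).length ≤
      (PySem.List.slice l (some (((l.takeWhile (pvNe o)).length : Int) + 1))
        (some ((l.takeWhile (pvNe c)).length : Int))).length := by
  rw [pv_grab_start o c hoc _ [], List.nil_append]
  by_cases hNP : c ∈ l.takeWhile (pvNe o)
  · have hne := pv_tw_ne o c hoc l ho hc
    have hlt : (l.takeWhile (pvNe c)).length < (l.takeWhile (pvNe o)).length := by
      have hx : ¬ ((l.takeWhile (pvNe o)).length < (l.takeWhile (pvNe c)).length) :=
        fun hx => ((pv_tw_lt o c hoc l ho).mp hx) hNP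
      omega
    have hout : o ∉ l.takeWhile (pvNe c) := (pv_tw_lt c o (Ne.symm hoc) l hc).mp hlt
    rw [pv_between_cfirst o c l hout]
    simp
  · rw [pv_slice_mid o c hoc l ho hNP, pv_between_ofirst o c hoc l ho hNP]
    exact List.length_filter_le _ _

theorem pv_piece_lt (o c : Char) (hoc : o ≠ c) (l : List Char) (ho : o ∈ l) (hc : c ∈ l)
    (h2 : 2 ≤ (l.takeWhile (pvNe c)).count o) :
    ((l.foldl (pvGrabStep o c) (false, false, [])).2.2).length <
      (PySem.List.slice l (some (((l.takeWhile (pvNe o)).length : Int) + 1))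
        (some ((l.takeWhile (pvNe c)).length : Int))).length := by
  obtain ⟨hfirst, hreg⟩ := pv_count_two_stray o c hoc l ho hc h2
  rw [pv_grab_start o c hoc _ [], List.nil_append,
    pv_slice_mid o c hoc l ho hfirst, pv_between_ofirst o c hoc l ho hfirst]
  exact (List.length_filter_lt_length_iff_exists).mpr ⟨o, hreg, by simp [pvNe]⟩

theorem pvT1cons : ("<a href=\"" : String).toList = '<' :: 'a' :: (" href=\"" : String).toList := rfl

set_option maxHeartbeats 1600000 in
theorem pv_tight (line : String) (hD : D_compile_links line) :
    compile_links line ≠ compile_links_alt line := by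
  obtain ⟨hIn2, hB, hdisj⟩ := hD
  have t2 : ("](" : String).toList = [']', '('] := rfl
  have t1 : (")" : String).toList = [')'] := rfl
  have tLB : ("[" : String).toList = ['['] := rfl
  have tRB : ("]" : String).toList = [']'] := rfl
  have tOP : ("(" : String).toList = ['('] := rfl
  have hA : [']','('] <:+: line.toList := by
    have := (PySem.Str.isIn_iff_infix "](" line).mp hIn2
    rwa [t2] at this
  have hRB : ']' ∈ line.toList := hA.sublist.subset (by simp)
  have hOP : '(' ∈ line.toList := hA.sublist.subset (by simp)
  have hIn1 : PySem.Str.isIn ")" line = true :=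
    (PySem.Str.isIn_iff_infix ")" line).mpr (t1 ▸ (List.singleton_infix_iff ')' line.toList).mpr hB)
  have hmv : (line.toList.foldl pvMvStep (false, 0)).1 = true := by
    rw [(pv_mv line.toList).1 false 0 (by omega)]
    simp [hA]
  have hep : (line.toList.foldl (pvGrabStep '(' ')') (false, false, [])).1 = true := by
    rw [pv_grab_fst]
    simp [hB]
  have heb : (line.toList.foldl (pvGrabStep '[' ']') (false, false, [])).1 = true := by
    rw [pv_grab_fst]
    simp [hRB]
  have hcb : PySem.Str.find line "]" = ((line.toList.takeWhile (pvNe ']')).length : Int) := by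
    rw [PySem.Str.find_eq, tRB, pv_find_mem _ _ hRB]
  have hop : PySem.Str.find line "(" = ((line.toList.takeWhile (pvNe '(')).length : Int) := by
    rw [PySem.Str.find_eq, tOP, pv_find_mem _ _ hOP]
  have hcp : PySem.Str.find line ")" = ((line.toList.takeWhile (pvNe ')')).length : Int) := by
    rw [PySem.Str.find_eq, t1, pv_find_mem _ _ hB]
  intro heq
  have hl := congrArg String.toList heq
  simp only [compile_links, compile_links_alt, hIn1, hIn2, hmv, hep, heb] at hl
  simp only [Bool.not_true, Bool.or_self, Bool.false_eq_true, Bool.true_eq_false, if_false] at hl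
  simp only [String.toList_append, String.toList_ofList,
    PySem.Str.toList_slice, PySem.Chars.slice_eq_listSlice] at hl
  rw [hcb, hop, hcp] at hl
  have hc1 : ((line.toList.takeWhile (pvNe ')')).length : Int) + 1
      = (((line.toList.takeWhile (pvNe ')')).length + 1 : Nat) : Int) := by push_cast; ring
  rw [hc1, PySem.List.slice_from_natCast, pv_drop_succ ')' line.toList hB,
    pv_six _ [], List.nil_append] at hl
  by_cases hLB : '[' ∈ line.toList
  · -- '[' present: every B piece is at least as long as A's, and the stated
    -- stray disjunct makes one strictly longer, so the lengths differ
    have hob : PySem.Str.find line "[" = ((line.toList.takeWhile (pvNe '[')).length : Int) := by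
      rw [PySem.Str.find_eq, tLB, pv_find_mem _ _ hLB]
    rw [hob, PySem.List.slice_to_natCast, pv_take_takeWhile, pv_linetwo] at hl
    have hlen := congrArg List.length hl
    simp only [List.length_append] at hlen
    have hsl := pv_piece_le '(' ')' (by decide) line.toList hOP hB
    have hsn := pv_piece_le '[' ']' (by decide) line.toList hLB hRB
    have hsix : (((line.toList.dropWhile (pvNe ')')).tail).filter (pvNe ')')).length ≤
        ((line.toList.dropWhile (pvNe ')')).tail).length := List.length_filter_le _ _
    rcases hdisj with hx | hx | hx | hx
    · exact absurd hLB (by simpa using hx)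
    · have := pv_piece_lt '[' ']' (by decide) line.toList hLB hRB hx
      omega
    · have := pv_piece_lt '(' ')' (by decide) line.toList hOP hB hx
      omega
    · have hmem : ')' ∈ (line.toList.dropWhile (pvNe ')')).tail :=
        pv_count_ge_two_mem_tail ')' line.toList hB hx
      have : (((line.toList.dropWhile (pvNe ')')).tail).filter (pvNe ')')).length <
          ((line.toList.dropWhile (pvNe ')')).tail).length :=
        (List.length_filter_lt_length_iff_exists).mpr ⟨')', hmem, by simp [pvNe]⟩
      omega
  · -- no '[': A keeps the whole line as prefix, B drops its last character, so
    -- the two outputs disagree at index (length of the line)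
    have hob : PySem.Str.find line "[" = -1 := by
      rw [PySem.Str.find_eq, tLB, pv_find_not_mem _ _ hLB]
    rw [hob, PySem.List.slice_to_neg_one, pv_linetwo, pv_tw_all '[' _ hLB] at hl
    simp only [List.append_assoc] at hl
    have hpos : 0 < line.toList.length := List.length_pos_of_mem hB
    have hdl : line.toList.dropLast.length = line.toList.length - 1 := List.length_dropLast
    have hidx := congrArg (fun xs => xs[line.toList.length]?) hl
    simp only at hidx
    rw [List.getElem?_append_right (le_refl line.toList.length), Nat.sub_self] at hidx
    rw [List.getElem?_append_right
        (show line.toList.dropLast.length ≤ line.toList.length from by omega), hdl,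
      show line.toList.length - (line.toList.length - 1) = 1 from by omega] at hidx
    rw [pvT1cons] at hidx
    simp at hidx

-- ===== VERDICT (by name: the statement is the Claim_ definition above) =====
theorem compile_links_spec : Claim_unchanged_compile_links := by
  intro line _
  unfold Spec_compile_links
  intro hD
  exact pv_main line hD

theorem compile_links_changed : Claim_changed_compile_links := by
  unfold Claim_changed_compile_links; decide

theorem compile_links_tight : Claim_exact_compile_links := by
  intro line _ hD
  exact pv_tight line hD
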